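-- pv_equiv track=rewrite | github.com/schiebermc/CP_Lib | HackerRank/Practice/NimbleGame/pycode.py | nimbleGame
-- ===== SOURCE A (Python) =====
-- from functools import reduce
--
-- def nimbleGame(s, n):
--     a=[]
--     for i in range(n):
--         a+=[i]*(s[i]%2)
--     if a==[]:
--         return 'Second'
--     else:
--         return 'First' if reduce((lambda x,y:x^y),a) else 'Second'
-- ===== SOURCE B (Python) =====
-- def nimbleGame(s, n):
--     # Per-bit parity: the xor of the odd-pile indices is nonzero iff some bit
--     # position is set in an odd number of those indices.  Indices are < 2**31,
--     # so 31 bit positions suffice.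
--     for b in range(31):
--         cnt = 0
--         for i in range(n):
--             if s[i] % 2 and (i >> b) & 1:
--                 cnt += 1
--         if cnt % 2:
--             return 'First'
--     return 'Second'
-- ===== Notes on version B (the rewrite author's own statement) =====
-- stated objective: alternative
-- what changed: Instead of collecting the odd-pile indices and reducing them with xor, B never computes a xor of indices at all: for each of the 31 bit positions it counts how many odd-pile indices have that bit set and answers 'First' as soon as one such count is odd (the xor is nonzero iff some bit has odd parity).
import Mathlib
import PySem

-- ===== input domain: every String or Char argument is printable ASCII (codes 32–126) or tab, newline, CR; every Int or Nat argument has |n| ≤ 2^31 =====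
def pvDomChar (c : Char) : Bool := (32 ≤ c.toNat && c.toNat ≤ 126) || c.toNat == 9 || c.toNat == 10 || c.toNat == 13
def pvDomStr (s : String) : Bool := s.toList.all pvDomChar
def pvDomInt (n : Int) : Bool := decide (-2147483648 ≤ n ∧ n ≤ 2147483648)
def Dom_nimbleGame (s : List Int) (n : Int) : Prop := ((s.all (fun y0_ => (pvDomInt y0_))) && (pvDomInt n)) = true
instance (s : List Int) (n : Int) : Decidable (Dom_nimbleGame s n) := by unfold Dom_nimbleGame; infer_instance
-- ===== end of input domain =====

-- B never xors indices: for each of the 31 bit positions it counts the odd-pile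
-- indices with that bit set and answers 'First' as soon as one count is odd
-- (the xor of the indices is nonzero iff some bit has odd parity); objective: alternative.

-- ===== PORT A =====
def nimbleGame (s : List Int) (n : Int) : String :=
  let a := (PySem.List.pyRange 0 n 1).foldl
    (fun a i => a ++ List.replicate (PySem.Int.mod (PySem.List.pyGetD s i 0) 2).toNat i) []
  match a with
  | [] => "Second"
  | h :: t => if t.foldl (fun x y => PySem.Int.bxor x y) h ≠ 0 then "First" else "Second"

-- ===== PORT B =====
-- inner loop of Source B: cnt over i in range(n)
def pvCnt (s : List Int) (n : Int) (b : Int) : Int :=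
  (PySem.List.pyRange 0 n 1).foldl
    (fun c i =>
      if PySem.Int.mod (PySem.List.pyGetD s i 0) 2 ≠ 0 ∧ PySem.Int.band (i >>> b.toNat) 1 ≠ 0
      then c + 1 else c) 0

-- outer loop of Source B with its early 'return First'
def pvBitLoop (s : List Int) (n : Int) : List Int → String
  | [] => "Second"
  | b :: rest => if PySem.Int.mod (pvCnt s n b) 2 ≠ 0 then "First" else pvBitLoop s n rest

def nimbleGame_alt (s : List Int) (n : Int) : String :=
  pvBitLoop s n (PySem.List.pyRange 0 31 1)

-- ===== PRECONDITION & SPEC =====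
-- Pre_ excludes exactly n > len(s), where Python A raises IndexError (B raises there too).
def Pre_nimbleGame (s : List Int) (n : Int) : Prop := n ≤ (s.length : Int)
instance (s : List Int) (n : Int) : Decidable (Pre_nimbleGame s n) := by unfold Pre_nimbleGame; infer_instance
def pvWitness_nimbleGame : List Int × Int := ([2, 1, 3], 3)

def Spec_nimbleGame (s : List Int) (n : Int) (out : String) : Prop := out = nimbleGame_alt s n
instance (s : List Int) (n : Int) (out : String) : Decidable (Spec_nimbleGame s n out) := by unfold Spec_nimbleGame; infer_instance

-- ===== CLAIM (what is proved, stated in full; the proofs are below) =====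
def Claim_equal_nimbleGame : Prop := ∀ (s : List Int) (n : Int), Dom_nimbleGame s n → Pre_nimbleGame s n → Spec_nimbleGame s n (nimbleGame s n)

-- ===== LEMMAS AND PROOFS =====

-- the odd-pile indices, as naturals
def pvOdd (s : List Int) (n' : Nat) : List Nat :=
  (List.range n').filter (fun k => decide (PySem.Int.mod (s.getD k 0) 2 ≠ 0))

-- A's per-index list piece folded by xor equals a single conditional xor step.
lemma pv_step (s : List Int) (i acc : Int) :
    (List.replicate (PySem.Int.mod (PySem.List.pyGetD s i 0) 2).toNat i).foldl
        (fun x y => PySem.Int.bxor x y) acc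
      = (if PySem.Int.mod (PySem.List.pyGetD s i 0) 2 ≠ 0 then PySem.Int.bxor acc i else acc) := by
  have hb : (PySem.List.pyGetD s i 0) % 2 = 0 ∨ (PySem.List.pyGetD s i 0) % 2 = 1 := by omega
  rcases hb with hb | hb <;> simp [hb]

-- the conditional-xor fold over any index list, started from the xor of A's
-- accumulated list, lands on the xor of A's final list.
lemma pv_key (s : List Int) (L : List Int) (a0 : List Int) :
    (L.foldl (fun a i =>
        a ++ List.replicate (PySem.Int.mod (PySem.List.pyGetD s i 0) 2).toNat i) a0).foldl
      (fun x y => PySem.Int.bxor x y) 0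
    = L.foldl
        (fun x i => if PySem.Int.mod (PySem.List.pyGetD s i 0) 2 ≠ 0 then PySem.Int.bxor x i else x)
        (a0.foldl (fun x y => PySem.Int.bxor x y) 0) := by
  induction L generalizing a0 with
  | nil => rfl
  | cons i L ih =>
    simp only [List.foldl_cons]
    rw [ih, List.foldl_append, pv_step]

-- A's reduce-with-guard over a list equals testing the xor-fold of the whole list from 0.
lemma pv_reduce (a : List Int) :
    (match a with
      | [] => "Second"
      | h :: t => if t.foldl (fun x y => PySem.Int.bxor x y) h ≠ 0 then "First" else "Second")
    = (if a.foldl (fun x y => PySem.Int.bxor x y) 0 ≠ 0 then "First" else "Second") := by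
  cases a with
  | nil => simp
  | cons h t => simp [PySem.Int.bxor_comm 0 h]


-- the Int conditional-xor fold over cast naturals is the cast of the Nat fold
lemma pv_toNat_fold (c : Nat → Bool) (l : List Nat) (a : Nat) :
    l.foldl (fun (x : Int) k => if c k = true then PySem.Int.bxor x (k : Int) else x) ((a : Nat) : Int)
      = ((l.foldl (fun x k => if c k = true then x ^^^ k else x) a : Nat) : Int) := by
  induction l generalizing a with
  | nil => rfl
  | cons k l ih =>
    simp only [List.foldl_cons]
    by_cases hc : c k = true
    · rw [if_pos hc, if_pos hc, PySem.Int.bxor_natCast, ih]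
    · rw [if_neg hc, if_neg hc, ih]

-- A's result is determined by the Nat xor of the odd-pile indices
lemma pv_A_char (s : List Int) (n : Int) :
    nimbleGame s n
      = (if ((pvOdd s n.toNat).foldl (fun x k => x ^^^ k) 0) ≠ 0 then "First" else "Second") := by
  unfold nimbleGame
  rw [pv_reduce, pv_key s _ []]
  rw [show PySem.List.pyRange 0 n 1 = (List.range n.toNat).map (fun k : Nat => (k : Int)) from by
    rw [PySem.List.pyRange_one]; simp]
  rw [List.foldl_map]
  have hfun : (fun (x : Int) (k : Nat) =>
        if PySem.Int.mod (PySem.List.pyGetD s (k : Int) 0) 2 ≠ 0 then PySem.Int.bxor x (k : Int) else x)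
      = (fun (x : Int) (k : Nat) =>
        if (fun j : Nat => decide (PySem.Int.mod (s.getD j 0) 2 ≠ 0)) k = true
        then PySem.Int.bxor x (k : Int) else x) := by
    funext x k
    simp
  rw [hfun]
  rw [show (List.foldl (fun x y => PySem.Int.bxor x y) 0 ([] : List Int)) = ((0 : Nat) : Int) from rfl]
  rw [pv_toNat_fold]
  unfold pvOdd
  rw [List.foldl_filter]
  simp

-- bit b of a xor-fold: parity of the count of elements with bit b set
lemma pv_fold_testBit (l : List Nat) (a : Nat) (b : Nat) :
    (l.foldl (fun x k => x ^^^ k) a).testBit b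
      = ((a.testBit b).xor (decide (Odd (l.countP (fun k => k.testBit b))))) := by
  induction l generalizing a with
  | nil => simp
  | cons k l ih =>
    simp only [List.foldl_cons, List.countP_cons, ih]
    rcases Nat.even_or_odd (l.countP (fun k => k.testBit b)) with he | ho <;>
      cases hk : k.testBit b <;> cases ha : a.testBit b <;>
      simp_all [Nat.testBit_xor, Nat.even_iff, Nat.odd_iff, Nat.add_mod]

-- Python's (i >> b) & 1 on a natural index reads bit b
lemma pv_bit_cond (k b : Nat) : (PySem.Int.band ((k : Int) >>> b) 1 ≠ 0) ↔ k.testBit b := by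
  have h : PySem.Int.band ((k : Int) >>> b) 1 = (((k >>> b) &&& 1 : Nat) : Int) := by
    rw [← Int.natCast_shiftRight, show ((1 : Int)) = ((1 : Nat) : Int) from rfl,
      PySem.Int.band_natCast]
  rw [h]
  simp [Nat.testBit, Nat.and_one_is_mod]
  rw [← Int.natCast_shiftRight]
  omega

-- B's inner count equals the number of odd-pile indices with bit b set
lemma pv_cnt_char (s : List Int) (n : Int) (b : Nat) :
    pvCnt s n (b : Int) = (((pvOdd s n.toNat).countP (fun k => k.testBit b) : Nat) : Int) := by
  unfold pvCnt
  rw [show PySem.List.pyRange 0 n 1 = (List.range n.toNat).map (fun k : Nat => (k : Int)) from by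
    rw [PySem.List.pyRange_one]; simp]
  rw [List.foldl_map]
  have hfun : (fun (c : Int) (k : Nat) =>
        if PySem.Int.mod (PySem.List.pyGetD s (k : Int) 0) 2 ≠ 0 ∧
            PySem.Int.band ((k : Int) >>> (((b : Nat) : Int)).toNat) 1 ≠ 0 then c + 1 else c)
      = (fun (c : Int) (k : Nat) =>
        if (fun j : Nat => j.testBit b && decide (PySem.Int.mod (s.getD j 0) 2 ≠ 0)) k = true
        then c + 1 else c) := by
    funext c k
    have hb := pv_bit_cond k b
    by_cases h2 : k.testBit b <;> simp [h2, Int.toNat_natCast, hb]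
  rw [hfun, PySem.List.foldl_count_if]
  unfold pvOdd
  rw [List.countP_filter]
  simp

-- Source B's outer loop returns 'First' exactly when some bit in the list has an odd count
lemma pv_loop_char (s : List Int) (n : Int) (l : List Int) :
    pvBitLoop s n l
      = (if ∃ b ∈ l, PySem.Int.mod (pvCnt s n b) 2 ≠ 0 then "First" else "Second") := by
  induction l with
  | nil => simp [pvBitLoop]
  | cons b l ih =>
    unfold pvBitLoop
    rw [ih]
    by_cases hb : PySem.Int.mod (pvCnt s n b) 2 ≠ 0
    · rw [if_pos hb, if_pos ⟨b, List.mem_cons_self, hb⟩]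
    · rw [if_neg hb]
      have hiff : (∃ x ∈ b :: l, PySem.Int.mod (pvCnt s n x) 2 ≠ 0)
          ↔ (∃ x ∈ l, PySem.Int.mod (pvCnt s n x) 2 ≠ 0) := by
        constructor
        · rintro ⟨x, hx, hPx⟩
          rcases List.mem_cons.mp hx with he | hm
          · exact absurd (he ▸ hPx) hb
          · exact ⟨x, hm, hPx⟩
        · rintro ⟨x, hx, hPx⟩
          exact ⟨x, List.mem_cons_of_mem _ hx, hPx⟩
      rw [if_congr hiff rfl rfl]

-- the xor of naturals below 2^31 stays below 2^31
lemma pv_fold_lt (l : List Nat) : ∀ (a : Nat), a < 2 ^ 31 → (∀ k ∈ l, k < 2 ^ 31) →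
    l.foldl (fun x k => x ^^^ k) a < 2 ^ 31 := by
  induction l with
  | nil => intro a ha _; exact ha
  | cons k l ih =>
    intro a ha hl
    exact ih _ (Nat.xor_lt_two_pow ha (hl k List.mem_cons_self))
      (fun j hj => hl j (List.mem_cons_of_mem _ hj))

-- Python's c % 2 on a Nat count, as a Nat fact
lemma pv_mod2 (c : Nat) : PySem.Int.mod ((c : Nat) : Int) 2 ≠ 0 ↔ c % 2 = 1 := by
  have hm : PySem.Int.mod ((c : Nat) : Int) 2 = ((c % 2 : Nat) : Int) := by
    exact_mod_cast PySem.Int.mod_natCast c 2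
  rw [hm]
  omega

-- ===== VERDICT (by name: the statement is the Claim_ definition above) =====
theorem nimbleGame_spec : Claim_equal_nimbleGame := by
  intro s n hd _
  have hn : n ≤ 2147483648 := by
    simp only [Dom_nimbleGame, pvDomInt, Bool.and_eq_true, decide_eq_true_eq] at hd
    exact hd.2.2
  unfold Spec_nimbleGame nimbleGame_alt
  rw [pv_A_char, pv_loop_char]
  set X : Nat := (pvOdd s n.toNat).foldl (fun x k => x ^^^ k) 0 with hX
  have hlt : X < 2 ^ 31 := by
    apply pv_fold_lt _ _ (by norm_num)
    intro k hk
    have h1 : k < n.toNat := List.mem_range.mp (List.mem_of_mem_filter hk)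
    have h2 : n.toNat ≤ 2 ^ 31 := by omega
    omega
  have hbit : ∀ b : Nat,
      X.testBit b = decide (Odd ((pvOdd s n.toNat).countP (fun k => k.testBit b))) := by
    intro b
    rw [hX, pv_fold_testBit]
    simp
  have hiff : (∃ b ∈ PySem.List.pyRange 0 31 1, PySem.Int.mod (pvCnt s n b) 2 ≠ 0) ↔ X ≠ 0 := by
    constructor
    · rintro ⟨b, hbmem, hbodd⟩
      have hb := (PySem.List.mem_pyRange_one).mp hbmem
      rw [show b = ((b.toNat : Nat) : Int) from by omega, pv_cnt_char, pv_mod2] at hbodd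
      have hodd : Odd ((pvOdd s n.toNat).countP (fun k => k.testBit b.toNat)) := by
        rw [Nat.odd_iff]; omega
      intro h0
      have hb2 := hbit b.toNat
      rw [h0] at hb2
      simp [hodd] at hb2
    · intro h0
      by_contra hne
      push Not at hne
      apply h0
      apply Nat.eq_of_testBit_eq
      intro j
      simp only [Nat.zero_testBit]
      by_cases hj : j < 31
      · have hjmem : ((j : Nat) : Int) ∈ PySem.List.pyRange 0 31 1 := by
          rw [PySem.List.mem_pyRange_one]; omega
        have hcnt := hne _ hjmem
        rw [pv_cnt_char] at hcnt
        have heven : ¬ Odd ((pvOdd s n.toNat).countP (fun k => k.testBit j)) := by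
          rw [Nat.odd_iff]
          intro habs
          exact (pv_mod2 _).mpr habs hcnt
        rw [hbit j]
        simpa using heven
      · exact Nat.testBit_lt_two_pow
          (lt_of_lt_of_le hlt (Nat.pow_le_pow_right (by norm_num) (by omega)))
  by_cases hx : X ≠ 0
  · rw [if_pos hx, if_pos (hiff.mpr hx)]
  · rw [if_neg hx, if_neg (fun h => hx (hiff.mp h))]
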